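-- pv_equiv track=rewrite | github.com/G-K-404/comp-prog | Codeforces/B_Zuma.py | go
-- ===== SOURCE A (Python) =====
-- def go(i,j):
--     if i>j:
--         return 0
--     if i==j:
--         return 1
--     a = go(i+1,j)
--     b = go(i+1, j-1)
--     return min(a,b)
-- ===== SOURCE B (Python) =====
-- def go(i, j):
--     # Closed form: the recursion's value is 1 exactly when i == j, else 0.
--     return 1 if i == j else 0
-- ===== Notes on version B (the rewrite author's own statement) =====
-- stated objective: simpler
-- what changed: Replaced the double exponential recursion by the closed form 1 if i==j else 0, proved equal by strong induction on j-i.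
import Mathlib
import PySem

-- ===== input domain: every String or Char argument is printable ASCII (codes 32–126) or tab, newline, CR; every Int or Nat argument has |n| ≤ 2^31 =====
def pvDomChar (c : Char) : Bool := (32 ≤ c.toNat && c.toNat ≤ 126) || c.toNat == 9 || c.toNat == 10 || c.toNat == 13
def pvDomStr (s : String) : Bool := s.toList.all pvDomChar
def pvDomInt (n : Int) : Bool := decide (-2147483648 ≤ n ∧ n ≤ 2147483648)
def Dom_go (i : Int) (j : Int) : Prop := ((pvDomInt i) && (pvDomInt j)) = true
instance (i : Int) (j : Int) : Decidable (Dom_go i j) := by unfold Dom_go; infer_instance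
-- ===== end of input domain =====

-- B replaces A's exponential recursion by its closed form (1 iff i = j); proved equal by strong induction on j - i.

-- ===== PORT A =====
def go (i : Int) (j : Int) : Int :=
  if i > j then 0
  else if i = j then 1
  else
    let a := go (i+1) j
    let b := go (i+1) (j-1)
    min a b
termination_by (j - i).toNat
decreasing_by all_goals omega

-- ===== PORT B =====
def go_alt (i : Int) (j : Int) : Int :=
  if i = j then 1 else 0

-- ===== PRECONDITION & SPEC =====
-- Pre_ excludes j - i >= 950: near and beyond Python's recursion limit A's
-- i -> i+1 call chain raises RecursionError (or, just below the limit, never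
-- observably returns), so no return value of A exists to match there.
def Pre_go (i : Int) (j : Int) : Prop := j - i < 950
instance (i : Int) (j : Int) : Decidable (Pre_go i j) := by unfold Pre_go; infer_instance
def pvWitness_go : Int × Int := (0, 5)
def Spec_go (i : Int) (j : Int) (out : Int) : Prop := out = go_alt i j
instance (i : Int) (j : Int) (out : Int) : Decidable (Spec_go i j out) := by unfold Spec_go; infer_instance

-- ===== CLAIM (what is proved, stated in full; the proofs are below) =====
def Claim_equal_go : Prop := ∀ (i : Int) (j : Int), Dom_go i j → Pre_go i j → Spec_go i j (go i j)

-- ===== LEMMAS AND PROOFS =====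

theorem go_closed (i j : Int) : go i j = if i = j then 1 else 0 := by
  by_cases hgt : i > j
  · rw [go]
    simp [hgt]
    omega
  · by_cases heq : i = j
    · rw [go]; simp [heq]
    · have hlt : i < j := by omega
      have ha : go (i+1) j = if i + 1 = j then 1 else 0 := go_closed (i+1) j
      have hb : go (i+1) (j-1) = if i + 1 = j - 1 then 1 else 0 := go_closed (i+1) (j-1)
      rw [go]
      simp only [hgt, if_false, heq, if_false]
      rw [ha, hb]
      split_ifs <;> simp_all
termination_by (j - i).toNat
decreasing_by all_goals omega

-- ===== VERDICT (by name: the statement is the Claim_ definition above) =====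
theorem go_spec : Claim_equal_go := by
  intro i j _ _
  unfold Spec_go go_alt
  exact go_closed i j
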